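-- pv_equiv track=rewrite | github.com/yuyudhan/repo_analyzer | src/repo_analyzer/core/env_extractor.py | _get_env_var_description
-- ===== SOURCE A (Python) =====
-- def _get_env_var_description(var_name: str) -> str:
--     """
--     Get description for common environment variables.
--
--     Args:
--         var_name: Environment variable name
--
--     Returns:
--         Description of the variable's purpose
--     """
--     var_lower = var_name.lower()
--
--     descriptions = {
--         "port": "Application server port",
--         "host": "Server host address",
--         "database_url": "Database connection string",
--         "db_host": "Database host",
--         "db_port": "Database port",
--         "db_name": "Database name",
--         "db_user": "Database username",
--         "db_password": "Database password",
--         "redis_url": "Redis connection string",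
--         "jwt_secret": "JWT signing secret",
--         "api_key": "External API key",
--         "secret_key": "Application secret key",
--         "debug": "Debug mode flag",
--         "env": "Environment (dev/staging/prod)",
--         "log_level": "Logging level",
--         "cors_origin": "CORS allowed origins",
--         "session_secret": "Session encryption secret",
--         "stripe_key": "Stripe payment API key",
--         "aws_access_key": "AWS access credentials",
--         "google_client_id": "Google OAuth client ID",
--         "facebook_app_id": "Facebook app credentials",
--         "smtp_host": "Email server configuration",
--         "oauth_secret": "OAuth application secret",
--         "encryption_key": "Data encryption key",
--         "webhook_secret": "Webhook verification secret",
--     }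
--
--     # Direct match
--     for key, desc in descriptions.items():
--         if key in var_lower:
--             return desc
--
--     # Pattern matching
--     if "url" in var_lower or "uri" in var_lower:
--         return "Service connection URL/URI"
--     elif "key" in var_lower or "secret" in var_lower or "token" in var_lower:
--         return "Authentication/encryption key"
--     elif "host" in var_lower or "server" in var_lower:
--         return "Server/service host address"
--     elif "port" in var_lower:
--         return "Service port number"
--     elif "password" in var_lower or "pass" in var_lower:
--         return "Authentication password"
--     elif "user" in var_lower or "username" in var_lower:
--         return "Authentication username"
--     elif "email" in var_lower or "mail" in var_lower:
--         return "Email configuration"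
--     elif "timeout" in var_lower:
--         return "Timeout configuration (seconds)"
--     elif "max" in var_lower or "limit" in var_lower:
--         return "Limit/threshold configuration"
--     elif "enable" in var_lower or "disable" in var_lower:
--         return "Feature toggle flag"
--
--     return "Configuration parameter"
-- ===== SOURCE B (Python) =====
-- # Position-driven matcher with first-character dispatch: instead of testing each
-- # pattern with its own substring search, walk the lowered string once; at every
-- # position, only the patterns whose first character is the current character (found
-- # via a precomputed bucket index) are tried, and the minimum priority index of any
-- # pattern starting there is kept; its description is looked up at the end.
-- _TABLE = [
--     ("port", "Application server port"),
--     ("host", "Server host address"),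
--     ("database_url", "Database connection string"),
--     ("db_host", "Database host"),
--     ("db_port", "Database port"),
--     ("db_name", "Database name"),
--     ("db_user", "Database username"),
--     ("db_password", "Database password"),
--     ("redis_url", "Redis connection string"),
--     ("jwt_secret", "JWT signing secret"),
--     ("api_key", "External API key"),
--     ("secret_key", "Application secret key"),
--     ("debug", "Debug mode flag"),
--     ("env", "Environment (dev/staging/prod)"),
--     ("log_level", "Logging level"),
--     ("cors_origin", "CORS allowed origins"),
--     ("session_secret", "Session encryption secret"),
--     ("stripe_key", "Stripe payment API key"),
--     ("aws_access_key", "AWS access credentials"),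
--     ("google_client_id", "Google OAuth client ID"),
--     ("facebook_app_id", "Facebook app credentials"),
--     ("smtp_host", "Email server configuration"),
--     ("oauth_secret", "OAuth application secret"),
--     ("encryption_key", "Data encryption key"),
--     ("webhook_secret", "Webhook verification secret"),
--     ("url", "Service connection URL/URI"),
--     ("uri", "Service connection URL/URI"),
--     ("key", "Authentication/encryption key"),
--     ("secret", "Authentication/encryption key"),
--     ("token", "Authentication/encryption key"),
--     ("host", "Server/service host address"),
--     ("server", "Server/service host address"),
--     ("port", "Service port number"),
--     ("password", "Authentication password"),
--     ("pass", "Authentication password"),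
--     ("user", "Authentication username"),
--     ("username", "Authentication username"),
--     ("email", "Email configuration"),
--     ("mail", "Email configuration"),
--     ("timeout", "Timeout configuration (seconds)"),
--     ("max", "Limit/threshold configuration"),
--     ("limit", "Limit/threshold configuration"),
--     ("enable", "Feature toggle flag"),
--     ("disable", "Feature toggle flag"),
-- ]
--
--
--
-- # bucket index: first character of a pattern -> ordered list of (priority, pattern)
-- _BUCKETS = {}
-- for _j, (_pat, _desc) in enumerate(_TABLE):
--     _BUCKETS.setdefault(_pat[0], []).append((_j, _pat))
--
--
-- def _get_env_var_description(var_name: str) -> str: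
--     s = var_name.lower()
--     n = len(_TABLE)
--     best = n
--     for i in range(len(s)):
--         for j, pat in _BUCKETS.get(s[i], []):
--             if s.startswith(pat, i):
--                 if j < best:
--                     best = j
--                 break
--     if best < n:
--         return _TABLE[best][1]
--     return "Configuration parameter"
-- ===== Notes on version B (the rewrite author's own statement) =====
-- stated objective: alternative
-- what changed: Replaces A's pattern-driven scan (each table pattern tested with its own substring search, then an if/elif cascade) with a position-driven matcher: one walk over the lowered string that finds, at each start position, the highest-priority pattern beginning there and keeps the minimum priority index, looked up at the end.
import Mathlib
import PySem

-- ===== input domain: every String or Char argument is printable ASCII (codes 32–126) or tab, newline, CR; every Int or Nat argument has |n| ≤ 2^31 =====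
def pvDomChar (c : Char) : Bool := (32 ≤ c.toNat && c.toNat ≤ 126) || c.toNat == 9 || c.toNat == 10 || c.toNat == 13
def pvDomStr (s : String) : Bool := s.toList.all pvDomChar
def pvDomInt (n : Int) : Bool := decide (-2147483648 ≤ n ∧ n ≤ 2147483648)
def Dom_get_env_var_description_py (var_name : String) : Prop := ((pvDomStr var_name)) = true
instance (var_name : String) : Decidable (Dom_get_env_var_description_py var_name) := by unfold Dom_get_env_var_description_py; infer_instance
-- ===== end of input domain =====

-- B replaces A's pattern-driven scan (each pattern tested with a substring search, then an
-- if/elif cascade) by a position-driven matcher with first-character dispatch: walk the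
-- lowered string once, at each position try only the patterns bucketed under the current
-- character and keep the minimum priority index (objective: alternative).

-- ===== PORT A =====
-- the literal `descriptions` dict of A, in insertion order
def pvDescriptions : List (String × String) :=
  [("port", "Application server port"),
   ("host", "Server host address"),
   ("database_url", "Database connection string"),
   ("db_host", "Database host"),
   ("db_port", "Database port"),
   ("db_name", "Database name"),
   ("db_user", "Database username"),
   ("db_password", "Database password"),
   ("redis_url", "Redis connection string"),
   ("jwt_secret", "JWT signing secret"),
   ("api_key", "External API key"),
   ("secret_key", "Application secret key"),
   ("debug", "Debug mode flag"),
   ("env", "Environment (dev/staging/prod)"),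
   ("log_level", "Logging level"),
   ("cors_origin", "CORS allowed origins"),
   ("session_secret", "Session encryption secret"),
   ("stripe_key", "Stripe payment API key"),
   ("aws_access_key", "AWS access credentials"),
   ("google_client_id", "Google OAuth client ID"),
   ("facebook_app_id", "Facebook app credentials"),
   ("smtp_host", "Email server configuration"),
   ("oauth_secret", "OAuth application secret"),
   ("encryption_key", "Data encryption key"),
   ("webhook_secret", "Webhook verification secret")]

-- A's 'for key, desc in descriptions.items(): if key in var_lower: return desc';
-- when the loop falls through, execution continues with the if/elif cascade (base case).
def pvLoopA (var_lower : String) : List (String × String) → String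
  | [] =>
    if PySem.Str.isIn "url" var_lower || PySem.Str.isIn "uri" var_lower then
      "Service connection URL/URI"
    else if PySem.Str.isIn "key" var_lower || PySem.Str.isIn "secret" var_lower || PySem.Str.isIn "token" var_lower then
      "Authentication/encryption key"
    else if PySem.Str.isIn "host" var_lower || PySem.Str.isIn "server" var_lower then
      "Server/service host address"
    else if PySem.Str.isIn "port" var_lower then
      "Service port number"
    else if PySem.Str.isIn "password" var_lower || PySem.Str.isIn "pass" var_lower then
      "Authentication password"
    else if PySem.Str.isIn "user" var_lower || PySem.Str.isIn "username" var_lower then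
      "Authentication username"
    else if PySem.Str.isIn "email" var_lower || PySem.Str.isIn "mail" var_lower then
      "Email configuration"
    else if PySem.Str.isIn "timeout" var_lower then
      "Timeout configuration (seconds)"
    else if PySem.Str.isIn "max" var_lower || PySem.Str.isIn "limit" var_lower then
      "Limit/threshold configuration"
    else if PySem.Str.isIn "enable" var_lower || PySem.Str.isIn "disable" var_lower then
      "Feature toggle flag"
    else
      "Configuration parameter"
  | (key, desc) :: rest =>
    if PySem.Str.isIn key var_lower then desc else pvLoopA var_lower rest

def get_env_var_description_py (var_name : String) : String :=
  pvLoopA (PySem.Str.lower var_name) pvDescriptions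

-- ===== PORT B =====
-- B's priority table _TABLE: one (pattern, description) row per alternative, in priority order
def pvTable : List (String × String) :=
  [("port", "Application server port"),
   ("host", "Server host address"),
   ("database_url", "Database connection string"),
   ("db_host", "Database host"),
   ("db_port", "Database port"),
   ("db_name", "Database name"),
   ("db_user", "Database username"),
   ("db_password", "Database password"),
   ("redis_url", "Redis connection string"),
   ("jwt_secret", "JWT signing secret"),
   ("api_key", "External API key"),
   ("secret_key", "Application secret key"),
   ("debug", "Debug mode flag"),
   ("env", "Environment (dev/staging/prod)"),
   ("log_level", "Logging level"),
   ("cors_origin", "CORS allowed origins"),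
   ("session_secret", "Session encryption secret"),
   ("stripe_key", "Stripe payment API key"),
   ("aws_access_key", "AWS access credentials"),
   ("google_client_id", "Google OAuth client ID"),
   ("facebook_app_id", "Facebook app credentials"),
   ("smtp_host", "Email server configuration"),
   ("oauth_secret", "OAuth application secret"),
   ("encryption_key", "Data encryption key"),
   ("webhook_secret", "Webhook verification secret"),
   ("url", "Service connection URL/URI"),
   ("uri", "Service connection URL/URI"),
   ("key", "Authentication/encryption key"),
   ("secret", "Authentication/encryption key"),
   ("token", "Authentication/encryption key"),
   ("host", "Server/service host address"),
   ("server", "Server/service host address"),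
   ("port", "Service port number"),
   ("password", "Authentication password"),
   ("pass", "Authentication password"),
   ("user", "Authentication username"),
   ("username", "Authentication username"),
   ("email", "Email configuration"),
   ("mail", "Email configuration"),
   ("timeout", "Timeout configuration (seconds)"),
   ("max", "Limit/threshold configuration"),
   ("limit", "Limit/threshold configuration"),
   ("enable", "Feature toggle flag"),
   ("disable", "Feature toggle flag")]

-- B's `_BUCKETS`: first character of a pattern -> ordered (priority, pattern) list;
-- `pat[0]` on the nonempty table patterns is ported as `toList.headD ' '` (exact: no pattern is empty)
def pvHeadChar (p : String) : Char := p.toList.headD ' '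

def pvBuckets : PySem.Dict Char (List (Int × String)) :=
  (PySem.List.enumerate pvTable 0).foldl
    (fun d jp => PySem.Dict.modify d (pvHeadChar jp.2.1) [] (· ++ [(jp.1, jp.2.1)]))
    PySem.Dict.empty

-- B's inner loop over one bucket: `s.startswith(pat, i)` is ported on the suffix
-- `s.toList.drop i` (exact for the loop's indices 0 ≤ i < len(s)); `break` = return best
def pvBucketScan (suf : List Char) (best : Int) : List (Int × String) → Int
  | [] => best
  | (j, pat) :: rest =>
    if PySem.Chars.startswith suf pat.toList then
      (if j < best then j else best)
    else pvBucketScan suf best rest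

-- B's main loop; `s[i]` is ported as `s.toList.getD i.toNat ' '` (exact: i ranges over
-- 0 ≤ i < len(s)); `_TABLE[best][1]` under `best < n` is ported with getD (index in range,
-- the default pair is unreachable)
def get_env_var_description_py_alt (var_name : String) : String :=
  let s := PySem.Str.lower var_name
  let n : Int := (pvTable.length : Int)
  let best := (PySem.List.pyRange 0 (PySem.Str.len s) 1).foldl
      (fun best i =>
        pvBucketScan (s.toList.drop i.toNat) best
          (PySem.Dict.getD pvBuckets (s.toList.getD i.toNat ' ') []))
      n
  if best < n then (pvTable.getD best.toNat ("", "Configuration parameter")).2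
  else "Configuration parameter"

-- ===== PRECONDITION & SPEC =====
def Spec_get_env_var_description_py (var_name : String) (out : String) : Prop := out = get_env_var_description_py_alt var_name
instance (var_name : String) (out : String) : Decidable (Spec_get_env_var_description_py var_name out) := by unfold Spec_get_env_var_description_py; infer_instance

-- ===== CLAIM (what is proved, stated in full; the proofs are below) =====
def Claim_equal_get_env_var_description_py : Prop := ∀ (var_name : String), Dom_get_env_var_description_py var_name → Spec_get_env_var_description_py var_name (get_env_var_description_py var_name)

-- ===== LEMMAS AND PROOFS =====

-- first-match chain over a (pattern, desc) table, substring semantics (reference form of A)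
def pvFirstDesc (s : String) : List (String × String) → String
  | [] => "Configuration parameter"
  | (p, d) :: rest => if PySem.Str.isIn p s then d else pvFirstDesc s rest

-- index of the first table row whose pattern is a substring of s (tbl.length if none)
def pvFirstIdx (s : String) : List (String × String) → Nat
  | [] => 0
  | (p, _) :: rest => if PySem.Str.isIn p s then 0 else pvFirstIdx s rest + 1

lemma pv_if_or (a b : Bool) (x y : String) :
    (if (a || b) then x else y) = if a then x else if b then x else y := by
  cases a <;> simp

lemma pvLoopA_eq_firstDesc (s : String) :
    pvLoopA s pvDescriptions = pvFirstDesc s pvTable := by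
  simp only [pvDescriptions, pvTable, pvLoopA, pvFirstDesc, pv_if_or, Bool.or_assoc]

lemma pvFirstDesc_eq_get_firstIdx (s : String) (tbl : List (String × String)) :
    pvFirstDesc s tbl =
      (match tbl[pvFirstIdx s tbl]? with
       | some (_, d) => d
       | none => "Configuration parameter") := by
  induction tbl with
  | nil => rfl
  | cons hd tl ih =>
    obtain ⟨p, d⟩ := hd
    by_cases h : PySem.Chars.isIn p.toList s.toList = true
    · simp [pvFirstDesc, pvFirstIdx, h]
    · simp [pvFirstDesc, pvFirstIdx, h, ih]

-- first table index whose pattern starts the given suffix (tbl.length if none)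
def pvFirstAtC (suf : List Char) : List (String × String) → Nat
  | [] => 0
  | (p, _) :: rest => if PySem.Chars.startswith suf p.toList then 0 else pvFirstAtC suf rest + 1

-- pvFirstAtC / pvFirstIdx are findIdx-style: bounded, sound, minimal
lemma pvFirstAtC_le (suf : List Char) (tbl : List (String × String)) :
    pvFirstAtC suf tbl ≤ tbl.length := by
  induction tbl with
  | nil => simp [pvFirstAtC]
  | cons hd tl ih =>
    obtain ⟨p, d⟩ := hd
    simp only [pvFirstAtC, List.length_cons]
    split <;> omega

lemma pvFirstIdx_le (s : String) (tbl : List (String × String)) :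
    pvFirstIdx s tbl ≤ tbl.length := by
  induction tbl with
  | nil => simp [pvFirstIdx]
  | cons hd tl ih =>
    obtain ⟨p, d⟩ := hd
    simp only [pvFirstIdx, List.length_cons]
    split <;> omega

lemma pvFirstAtC_spec (suf : List Char) (tbl : List (String × String))
    (h : pvFirstAtC suf tbl < tbl.length) :
    ∃ p d, tbl[pvFirstAtC suf tbl]? = some (p, d) ∧ PySem.Chars.startswith suf p.toList = true := by
  induction tbl with
  | nil => simp at h
  | cons hd tl ih =>
    obtain ⟨p, d⟩ := hd
    by_cases hs : PySem.Chars.startswith suf p.toList = true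
    · exact ⟨p, d, by simp [pvFirstAtC, hs], hs⟩
    · simp only [pvFirstAtC, hs, Bool.false_eq_true, if_false, List.length_cons] at h ⊢
      obtain ⟨q, e, hg, hq⟩ := ih (by omega)
      exact ⟨q, e, by simpa using hg, hq⟩

lemma pvFirstAtC_min (suf : List Char) (tbl : List (String × String))
    (j : Nat) (p : String) (d : String)
    (hg : tbl[j]? = some (p, d)) (hs : PySem.Chars.startswith suf p.toList = true) :
    pvFirstAtC suf tbl ≤ j := by
  induction tbl generalizing j with
  | nil => simp at hg
  | cons hd tl ih =>
    obtain ⟨q, e⟩ := hd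
    cases j with
    | zero =>
      simp at hg
      obtain ⟨hq, he⟩ := hg
      subst hq
      simp [pvFirstAtC, hs]
    | succ j =>
      simp only [pvFirstAtC]
      split
      · omega
      · have := ih j (by simpa using hg)
        omega

lemma pvFirstIdx_spec (s : String) (tbl : List (String × String))
    (h : pvFirstIdx s tbl < tbl.length) :
    ∃ p d, tbl[pvFirstIdx s tbl]? = some (p, d) ∧ PySem.Str.isIn p s = true := by
  induction tbl with
  | nil => simp at h
  | cons hd tl ih =>
    obtain ⟨p, d⟩ := hd
    by_cases hs : PySem.Chars.isIn p.toList s.toList = true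
    · exact ⟨p, d, by simp [pvFirstIdx, hs], by simpa using hs⟩
    · simp only [pvFirstIdx, PySem.Str.isIn_eq, hs, Bool.false_eq_true, if_false,
        List.length_cons] at h ⊢
      obtain ⟨q, e, hg, hq⟩ := ih (by omega)
      exact ⟨q, e, by simpa using hg, hq⟩

lemma pvFirstIdx_min (s : String) (tbl : List (String × String))
    (j : Nat) (p : String) (d : String)
    (hg : tbl[j]? = some (p, d)) (hs : PySem.Str.isIn p s = true) :
    pvFirstIdx s tbl ≤ j := by
  induction tbl generalizing j with
  | nil => simp at hg
  | cons hd tl ih =>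
    obtain ⟨q, e⟩ := hd
    cases j with
    | zero =>
      simp at hg
      obtain ⟨hq, he⟩ := hg
      subst hq
      simp only [PySem.Str.isIn_eq] at hs
      simp [pvFirstIdx, hs]
    | succ j =>
      simp only [pvFirstIdx]
      split
      · omega
      · have := ih j (by simpa using hg)
        omega

-- every pattern in the table is nonempty
lemma pvTable_patterns_nonempty :
    ∀ pd ∈ pvTable, (pd.1 : String).toList ≠ [] := by decide

-- fold of min: lower bounds and attainment
lemma pv_foldl_min_le (M : Nat → Nat) (l : List Nat) (init : Nat) :
    l.foldl (fun b i => min b (M i)) init ≤ init ∧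
      ∀ i ∈ l, l.foldl (fun b i => min b (M i)) init ≤ M i := by
  induction l generalizing init with
  | nil => simp
  | cons hd tl ih =>
    obtain ⟨h1, h2⟩ := ih (min init (M hd))
    simp only [List.foldl_cons]
    refine ⟨by omega, ?_⟩
    intro i hi
    rcases List.mem_cons.mp hi with h | h
    · subst h; omega
    · exact h2 i h

lemma pv_foldl_min_attained (M : Nat → Nat) (l : List Nat) (init : Nat) :
    l.foldl (fun b i => min b (M i)) init = init ∨
      ∃ i ∈ l, l.foldl (fun b i => min b (M i)) init = M i := by
  induction l generalizing init with
  | nil => simp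
  | cons hd tl ih =>
    simp only [List.foldl_cons]
    rcases ih (min init (M hd)) with h | ⟨i, hi, h⟩
    · rcases Nat.le_total init (M hd) with hle | hle
      · left; rw [h]; omega
      · right; exact ⟨hd, List.mem_cons_self .., by rw [h]; omega⟩
    · right; exact ⟨i, List.mem_cons_of_mem _ hi, h⟩

-- bridge: a nonempty pattern is a substring of s iff it starts some suffix s[i:], i < |s|
lemma pv_isIn_iff_exists_start (p s : String) (hp : p.toList ≠ []) :
    PySem.Str.isIn p s = true ↔
      ∃ i < s.toList.length, PySem.Chars.startswith (s.toList.drop i) p.toList = true := by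
  constructor
  · intro h
    have h' : PySem.Chars.isIn p.toList s.toList = true := by simpa using h
    obtain ⟨j, hj⟩ := (PySem.Chars.exists_prefix_drop_iff_isIn p.toList s.toList).mpr h'
    have hjlt : j < s.toList.length := by
      by_contra hge
      rw [List.drop_eq_nil_of_le (by omega)] at hj
      exact hp (List.prefix_nil.mp hj)
    exact ⟨j, hjlt, (PySem.Chars.startswith_iff _ _).mpr hj⟩
  · rintro ⟨i, hi, hs⟩
    have hpref := (PySem.Chars.startswith_iff _ _).mp hs
    have h' : PySem.Chars.isIn p.toList s.toList = true :=
      (PySem.Chars.exists_prefix_drop_iff_isIn p.toList s.toList).mp ⟨i, hpref⟩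
    simpa using h'

-- the core: the fold over start positions of the first-pattern index computes the
-- first substring-match index of the whole table
lemma pv_fold_eq_firstIdx (s : String) (M : Nat → Nat)
    (hM : ∀ i, M i = pvFirstAtC (s.toList.drop i) pvTable) :
    (List.range s.toList.length).foldl (fun b i => min b (M i)) pvTable.length
      = pvFirstIdx s pvTable := by
  obtain ⟨hRinit, hRle⟩ := pv_foldl_min_le M (List.range s.toList.length) pvTable.length
  have hK := pvFirstIdx_le s pvTable
  apply Nat.le_antisymm
  · rcases Nat.lt_or_ge (pvFirstIdx s pvTable) pvTable.length with hlt | hge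
    · obtain ⟨p, d, hg, hin⟩ := pvFirstIdx_spec s pvTable hlt
      have hp : p.toList ≠ [] :=
        pvTable_patterns_nonempty (p, d) (List.mem_of_getElem? hg)
      obtain ⟨i, hi, hsw⟩ := (pv_isIn_iff_exists_start p s hp).mp hin
      have h1 := hRle i (List.mem_range.mpr hi)
      have h2 : M i ≤ pvFirstIdx s pvTable := by
        rw [hM]; exact pvFirstAtC_min _ pvTable _ p d hg hsw
      omega
    · omega
  · rcases pv_foldl_min_attained M (List.range s.toList.length) pvTable.length with h | ⟨i, hmem, h⟩
    · omega
    · rw [hM] at h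
      rcases Nat.lt_or_ge (pvFirstAtC (s.toList.drop i) pvTable) pvTable.length with hlt | hge2
      · obtain ⟨p, d, hg, hsw⟩ := pvFirstAtC_spec _ pvTable hlt
        have hp : p.toList ≠ [] :=
          pvTable_patterns_nonempty (p, d) (List.mem_of_getElem? hg)
        have hin : PySem.Str.isIn p s = true :=
          (pv_isIn_iff_exists_start p s hp).mpr ⟨i, List.mem_range.mp hmem, hsw⟩
        have := pvFirstIdx_min s pvTable _ p d hg hin
        omega
      · have := pvFirstAtC_le (s.toList.drop i) pvTable
        omega

-- a pattern that starts a suffix shares its first character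
lemma pv_head_of_startswith (suf p : List Char) (hp : p ≠ [])
    (h : PySem.Chars.startswith suf p = true) : p.headD ' ' = suf.headD ' ' := by
  have hpref := (PySem.Chars.startswith_iff _ _).mp h
  obtain ⟨t, ht⟩ := hpref
  cases p with
  | nil => exact absurd rfl hp
  | cons ph pt => subst ht; simp

-- scanning the c-bucket of a table slice equals min-with the first-pattern index
lemma pv_scan_enum (suf : List Char) (c : Char)
    (hc : suf.headD ' ' = c) :
    ∀ (tbl : List (String × String)) (k : Int) (best : Int),
      (∀ pd ∈ tbl, (pd.1 : String).toList ≠ []) →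
      pvBucketScan suf best
          (((PySem.List.enumerate tbl k).filter
              (fun jp => pvHeadChar jp.2.1 == c)).map (fun jp => (jp.1, jp.2.1)))
        = if pvFirstAtC suf tbl < tbl.length
            then min best (k + (pvFirstAtC suf tbl : Int)) else best := by
  intro tbl
  induction tbl with
  | nil => intro k best _; simp [PySem.List.enumerate_nil, pvBucketScan, pvFirstAtC]
  | cons hd tl ih =>
    intro k best hpat
    obtain ⟨p, d⟩ := hd
    have hp : p.toList ≠ [] := hpat (p, d) (List.mem_cons_self ..)
    have htl : ∀ pd ∈ tl, (pd.1 : String).toList ≠ [] :=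
      fun pd hm => hpat pd (List.mem_cons_of_mem _ hm)
    rw [PySem.List.enumerate_cons]
    by_cases hhead : pvHeadChar p = c
    · -- this row lands in the c-bucket
      simp only [List.filter_cons, hhead, beq_self_eq_true, if_true, List.map_cons]
      by_cases hsw : PySem.Chars.startswith suf p.toList = true
      · simp only [pvBucketScan, hsw, if_true, pvFirstAtC, List.length_cons]
        have := pvFirstAtC_le suf tl
        split
        · omega
        · omega
      · simp only [pvBucketScan, hsw, Bool.false_eq_true, if_false]
        rw [ih (k + 1) best htl]
        simp only [pvFirstAtC, hsw, Bool.false_eq_true, if_false, List.length_cons]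
        push_cast
        split_ifs <;> omega
    · -- this row is in another bucket and cannot match at this position
      have hsw : PySem.Chars.startswith suf p.toList = false := by
        by_contra hne'
        have : PySem.Chars.startswith suf p.toList = true := by
          cases h : PySem.Chars.startswith suf p.toList
          · exact absurd h hne'
          · rfl
        have hh := pv_head_of_startswith suf p.toList hp this
        exact hhead ((show pvHeadChar p = suf.headD ' ' from hh).trans hc)
      have hbeq : (pvHeadChar p == c) = false := by simpa using hhead
      simp only [List.filter_cons, hbeq, Bool.false_eq_true, if_false]
      rw [ih (k + 1) best htl]
      simp only [pvFirstAtC, hsw, Bool.false_eq_true, if_false, List.length_cons]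
      push_cast
      split_ifs <;> omega

-- building the buckets keys each pair by its pattern's first character, keeping order
lemma pv_getD_buildBuckets (L : List (Int × (String × String))) (c : Char) :
    PySem.Dict.getD
        (L.foldl
          (fun d jp => PySem.Dict.modify d (pvHeadChar jp.2.1) [] (· ++ [(jp.1, jp.2.1)]))
          PySem.Dict.empty) c []
      = (L.filter (fun jp => pvHeadChar jp.2.1 == c)).map (fun jp => (jp.1, jp.2.1)) := by
  induction L using List.reverseRecOn with
  | nil => simp [PySem.Dict.getD_empty]
  | append_singleton L a ih =>
    rw [List.foldl_append, List.foldl_cons, List.foldl_nil, PySem.Dict.getD_modify,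
      List.filter_append, List.map_append]
    by_cases hk : pvHeadChar a.2.1 = c
    · simp [hk, ih]
    · have : c ≠ pvHeadChar a.2.1 := fun h => hk h.symm
      simp [this, hk, ih]

-- the bucket dictionary holds exactly the table rows keyed by first character, in order
lemma pv_getD_buckets (c : Char) :
    PySem.Dict.getD pvBuckets c [] =
      ((PySem.List.enumerate pvTable 0).filter
          (fun jp => pvHeadChar jp.2.1 == c)).map (fun jp => (jp.1, jp.2.1)) := by
  unfold pvBuckets
  exact pv_getD_buildBuckets _ c

-- one step of B's position loop equals min-with the first-pattern index of the suffix
lemma pv_step (s : String) (i : Nat) (_hi : i < s.toList.length) (best : Int) :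
    pvBucketScan (s.toList.drop i) best
        (PySem.Dict.getD pvBuckets (s.toList.getD i ' ') []) =
      if pvFirstAtC (s.toList.drop i) pvTable < pvTable.length
        then min best ((pvFirstAtC (s.toList.drop i) pvTable : Int)) else best := by
  have hc : (s.toList.drop i).headD ' ' = s.toList.getD i ' ' := by
    rw [List.headD_eq_head?_getD, List.head?_drop, List.getD_eq_getElem?_getD]
  have := pv_scan_enum (s.toList.drop i) (s.toList.getD i ' ') hc pvTable 0 best
    pvTable_patterns_nonempty
  rw [pv_getD_buckets]
  simpa using this

-- B's Int-valued fold is the cast of the Nat-valued min fold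
lemma pv_fold_cast (s : String) :
    ∀ (l : List Nat), (∀ i ∈ l, i < s.toList.length) → ∀ (b : Nat), b ≤ pvTable.length →
      l.foldl
          (fun best i =>
            pvBucketScan (s.toList.drop i) best
              (PySem.Dict.getD pvBuckets (s.toList.getD i ' ') []))
          (b : Int)
        = ((l.foldl (fun best i => min best (pvFirstAtC (s.toList.drop i) pvTable)) b : Nat) : Int) := by
  intro l
  induction l with
  | nil => intro _ b _; rfl
  | cons hd tl ih =>
    intro hmem b hb
    simp only [List.foldl_cons]
    rw [pv_step s hd (hmem hd (List.mem_cons_self ..)) (b : Int)]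
    have hle := pvFirstAtC_le (s.toList.drop hd) pvTable
    have hcast :
        (if pvFirstAtC (s.toList.drop hd) pvTable < pvTable.length
          then min (b : Int) ((pvFirstAtC (s.toList.drop hd) pvTable : Nat) : Int) else (b : Int))
        = ((min b (pvFirstAtC (s.toList.drop hd) pvTable) : Nat) : Int) := by
      split <;> push_cast <;> omega
    rw [hcast]
    exact ih (fun i h => hmem i (List.mem_cons_of_mem _ h))
      (min b (pvFirstAtC (s.toList.drop hd) pvTable)) (by omega)

-- rewrite B's pyRange fold into the Nat-range fold above
lemma pv_alt_eq (var_name : String) :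
    get_env_var_description_py_alt var_name =
      (match pvTable[pvFirstIdx (PySem.Str.lower var_name) pvTable]? with
       | some (_, d) => d
       | none => "Configuration parameter") := by
  simp only [get_env_var_description_py_alt]
  set s := PySem.Str.lower var_name with hs
  have hlen : PySem.Str.len s = (s.toList.length : Int) := by
    simp [PySem.Str.len_eq]
  rw [hlen, PySem.List.pyRange_one, List.foldl_map]
  have hnn : ((s.toList.length : Int) - 0).toNat = s.toList.length := by omega
  rw [hnn]
  simp only [zero_add, Int.toNat_natCast]
  rw [pv_fold_cast s (List.range s.toList.length) (fun i h => List.mem_range.mp h)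
      pvTable.length le_rfl]
  rw [pv_fold_eq_firstIdx s _ (fun i => rfl)]
  rcases Nat.lt_or_ge (pvFirstIdx s pvTable) pvTable.length with h | h
  · obtain ⟨p, d, hg, _⟩ := pvFirstIdx_spec s pvTable h
    have hlt : ((pvFirstIdx s pvTable : Nat) : Int) < (pvTable.length : Int) := by
      exact_mod_cast h
    rw [hg]
    simp [hlt, List.getD_eq_getElem?_getD, hg]
  · have hnone : pvTable[pvFirstIdx s pvTable]? = none := by
      rw [List.getElem?_eq_none_iff]
      omega
    have hnlt : ¬ ((pvFirstIdx s pvTable : Nat) : Int) < (pvTable.length : Int) := by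
      exact_mod_cast Nat.not_lt.mpr h
    rw [hnone]
    simp [hnlt]

-- ===== VERDICT (by name: the statement is the Claim_ definition above) =====
theorem get_env_var_description_py_spec : Claim_equal_get_env_var_description_py := by
  intro var_name _
  unfold Spec_get_env_var_description_py get_env_var_description_py
  rw [pv_alt_eq, pvLoopA_eq_firstDesc, pvFirstDesc_eq_get_firstIdx]
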